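-- pv_equiv track=rewrite | github.com/TheDataPantry/CodingProblems | AdventOfCode/2024/Day2/Solution.py | monotonic_window
-- ===== SOURCE A (Python) =====
-- from typing import List
--
-- def monotonic_window(data: List) -> int:
--     valid_count = 0
--
--     for report in data:
--         diffs = [abs(report[i+1] - report[i]) for i in range(len(report) - 1)]
--         is_monotonic = all(report[i] < report[i+1] for i in range(len(report) - 1)) or all(report[i] > report[i+1] for i in range(len(report) - 1))
--         valid_diffs = all(1 <= d <= 3 for d in diffs)
--
--         if is_monotonic and valid_diffs:
--             valid_count += 1
--     return valid_count
-- ===== SOURCE B (Python) =====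
-- from typing import List
--
-- def _safe(report) -> bool:
--     sign = 0
--     for i in range(1, len(report)):
--         d = report[i] - report[i - 1]
--         if d == 0 or abs(d) > 3:
--             return False
--         if d > 0:
--             if sign == -1:
--                 return False
--             sign = 1
--         else:
--             if sign == 1:
--                 return False
--             sign = -1
--     return True
--
-- def monotonic_window(data: List) -> int:
--     return sum(_safe(report) for report in data)
-- ===== Notes on version B (the rewrite author's own statement) =====
-- stated objective: alternative
-- what changed: A runs three separate full passes per report (materialised abs-diff list plus two index-based all() scans); B replaces them with one stateful early-exit scan per report that establishes the direction from the first step, maintains only a sign flag, and rejects on the first step that is zero, too large, or against the established direction.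
import Mathlib
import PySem

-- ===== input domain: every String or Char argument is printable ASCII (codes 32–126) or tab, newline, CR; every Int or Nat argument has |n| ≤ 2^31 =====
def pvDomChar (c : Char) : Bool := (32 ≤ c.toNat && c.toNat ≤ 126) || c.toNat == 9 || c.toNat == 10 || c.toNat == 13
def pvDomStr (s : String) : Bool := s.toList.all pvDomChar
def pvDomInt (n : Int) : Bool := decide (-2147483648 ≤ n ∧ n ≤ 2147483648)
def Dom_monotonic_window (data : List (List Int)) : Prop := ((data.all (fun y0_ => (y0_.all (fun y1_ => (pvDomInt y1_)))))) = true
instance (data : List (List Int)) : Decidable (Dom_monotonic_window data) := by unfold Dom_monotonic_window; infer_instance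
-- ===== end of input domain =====

-- B replaces A's three full passes per report (abs-diff list + two index-based all() scans)
-- by one stateful early-exit scan carrying a direction flag; objective: alternative.

-- ===== PORT A =====
-- indices i and i+1 always lie in range (i < len-1), so pyGetD with default 0 is exact here
def monotonic_window (data : List (List Int)) : Int :=
  data.foldl (fun valid_count report =>
    let diffs : List Int := (PySem.List.pyRange 0 ((report.length : Int) - 1) 1).map
      (fun i => |PySem.List.pyGetD report (i + 1) 0 - PySem.List.pyGetD report i 0|)
    let is_monotonic : Bool :=
      ((PySem.List.pyRange 0 ((report.length : Int) - 1) 1).all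
        (fun i => decide (PySem.List.pyGetD report i 0 < PySem.List.pyGetD report (i + 1) 0))) ||
      ((PySem.List.pyRange 0 ((report.length : Int) - 1) 1).all
        (fun i => decide (PySem.List.pyGetD report i 0 > PySem.List.pyGetD report (i + 1) 0)))
    let valid_diffs : Bool := diffs.all (fun d => decide (1 ≤ d ∧ d ≤ 3))
    if is_monotonic && valid_diffs then valid_count + 1 else valid_count) 0

-- ===== PORT B =====
-- _safe's loop over i in range(1, len) with its early returns, carried as a structural
-- recursion over the tail with the previous element and the sign flag as state
def safeAux (prev : Int) (sign : Int) : List Int → Bool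
  | [] => true
  | x :: xs =>
    let d := x - prev
    if d = 0 ∨ |d| > 3 then false
    else if d > 0 then
      if sign = -1 then false else safeAux x 1 xs
    else
      if sign = 1 then false else safeAux x (-1) xs

def safe (report : List Int) : Bool :=
  match report with
  | [] => true
  | x :: xs => safeAux x 0 xs

-- sum(_safe(report) for report in data), booleans counting as 0/1
def monotonic_window_alt (data : List (List Int)) : Int :=
  data.foldl (fun acc report => acc + (if safe report then 1 else 0)) 0

-- ===== PRECONDITION & SPEC =====
def Spec_monotonic_window (data : List (List Int)) (out : Int) : Prop := out = monotonic_window_alt data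
instance (data : List (List Int)) (out : Int) : Decidable (Spec_monotonic_window data out) := by unfold Spec_monotonic_window; infer_instance

-- ===== CLAIM (what is proved, stated in full; the proofs are below) =====
def Claim_equal_monotonic_window : Prop := ∀ (data : List (List Int)), Dom_monotonic_window data → Spec_monotonic_window data (monotonic_window data)

-- ===== LEMMAS AND PROOFS =====

-- generic "every consecutive delta satisfies q" pass, threaded from the previous element
def okq (q : Int → Bool) : Int → List Int → Bool
  | _, [] => true
  | prev, x :: xs => q (x - prev) && okq q x xs

-- indexing over range(len-1) equals a zip pass over consecutive pairs
lemma range_all_eq_zip (p : Int → Int → Bool) :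
    ∀ r : List Int,
      (((List.range (r.length - 1)).all fun k => p (r.getD k 0) (r.getD (k + 1) 0))
        = (List.zipWith p r (r.drop 1)).all id)
  | [] => by simp
  | [a] => by simp
  | a :: b :: t => by
    have ih := range_all_eq_zip p (b :: t)
    simp only [List.length_cons, Nat.add_sub_cancel, List.range_succ_eq_map, List.all_cons,
      List.all_map, Function.comp_def, List.getD_cons_zero, List.getD_cons_succ,
      List.drop_succ_cons, List.drop_zero, List.zipWith_cons_cons, id_eq] at *
    rw [ih]

lemma pyall (F : Int → Bool) (n : Nat) :
    (PySem.List.pyRange 0 (n : Int) 1).all F = (List.range n).all (fun k => F k) := by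
  rw [PySem.List.pyRange_one]
  simp only [Int.sub_zero, Int.toNat_natCast, List.all_map, Function.comp_def, zero_add]

-- A's index-based all over range(len-1) as an all over the zip of consecutive pairs
lemma py_all_zip (p : Int → Int → Bool) (r : List Int) :
    ((PySem.List.pyRange 0 ((r.length : Int) - 1) 1).all
        fun i => p (PySem.List.pyGetD r i 0) (PySem.List.pyGetD r (i + 1) 0))
      = (List.zipWith p r (r.drop 1)).all id := by
  cases r with
  | nil => simp [PySem.List.pyRange_one_eq_nil]
  | cons x xs =>
    rw [show ((List.length (x :: xs) : Int) - 1) = ((xs.length : Nat) : Int) by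
      simp [List.length_cons]]
    rw [pyall]
    have h : ∀ k : Nat,
        p (PySem.List.pyGetD (x :: xs) (k : Int) 0) (PySem.List.pyGetD (x :: xs) ((k : Int) + 1) 0)
          = p ((x :: xs).getD k 0) ((x :: xs).getD (k + 1) 0) := by
      intro k
      rw [show ((k : Int) + 1) = (((k + 1 : Nat)) : Int) by push_cast; ring]
      simp only [PySem.List.pyGetD_natCast]
    simp only [h]
    have := range_all_eq_zip p (x :: xs)
    simpa [List.length_cons] using this

-- a zip pass on (x::xs, xs) applying q to the delta equals the threaded okq pass
lemma zip_eq_okq (q : Int → Bool) :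
    ∀ (x : Int) (xs : List Int),
      (List.zipWith (fun a b => q (b - a)) (x :: xs) xs).all id = okq q x xs
  | _, [] => by simp [okq]
  | x, y :: ys => by
    have ih := zip_eq_okq q y ys
    simp only [List.zipWith_cons_cons, List.all_cons, id_eq, okq] at *
    rw [ih]

-- characterisation of B's scan with the sign flag already set to +1: "all deltas in [1,3]"
lemma safeAux_pos : ∀ (xs : List Int) (prev : Int),
    safeAux prev 1 xs = okq (fun d => decide (1 ≤ d ∧ d ≤ 3)) prev xs
  | [], _ => rfl
  | x :: xs, prev => by
    have ih := safeAux_pos xs x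
    by_cases h0 : x - prev = 0 ∨ |x - prev| > 3
    · have hq : decide (1 ≤ x - prev ∧ x - prev ≤ 3) = false := by
        simp only [decide_eq_false_iff_not]
        rcases abs_cases (x - prev) with ⟨he, _⟩ | ⟨he, _⟩ <;> omega
      simp only [safeAux, okq, if_pos h0, hq, Bool.false_and]
    · by_cases hp : x - prev > 0
      · have hq : decide (1 ≤ x - prev ∧ x - prev ≤ 3) = true := by
          simp only [decide_eq_true_eq]
          rcases abs_cases (x - prev) with ⟨he, _⟩ | ⟨he, _⟩ <;> omega
        simp only [safeAux, okq, if_neg h0, if_pos hp, hq, Bool.true_and, ih]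
        norm_num
      · have hq : decide (1 ≤ x - prev ∧ x - prev ≤ 3) = false := by
          simp only [decide_eq_false_iff_not]; omega
        simp only [safeAux, okq, if_neg h0, if_neg hp, hq, Bool.false_and]
        norm_num

-- and with the flag set to -1: "all deltas in [-3,-1]"
lemma safeAux_neg : ∀ (xs : List Int) (prev : Int),
    safeAux prev (-1) xs = okq (fun d => decide (-3 ≤ d ∧ d ≤ -1)) prev xs
  | [], _ => rfl
  | x :: xs, prev => by
    have ih := safeAux_neg xs x
    by_cases h0 : x - prev = 0 ∨ |x - prev| > 3
    · have hq : decide (-3 ≤ x - prev ∧ x - prev ≤ -1) = false := by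
        simp only [decide_eq_false_iff_not]
        rcases abs_cases (x - prev) with ⟨he, _⟩ | ⟨he, _⟩ <;> omega
      simp only [safeAux, okq, if_pos h0, hq, Bool.false_and]
    · by_cases hp : x - prev > 0
      · have hq : decide (-3 ≤ x - prev ∧ x - prev ≤ -1) = false := by
          simp only [decide_eq_false_iff_not]; omega
        simp only [safeAux, okq, if_neg h0, if_pos hp, hq, Bool.false_and]
        norm_num
      · have hq : decide (-3 ≤ x - prev ∧ x - prev ≤ -1) = true := by
          simp only [decide_eq_true_eq]
          rcases abs_cases (x - prev) with ⟨he, _⟩ | ⟨he, _⟩ <;> omega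
        simp only [safeAux, okq, if_neg h0, if_neg hp, hq, Bool.true_and, ih]
        norm_num

-- with the flag still unset the scan decides between the two, so it computes the disjunction
lemma safeAux_zero : ∀ (xs : List Int) (prev : Int),
    safeAux prev 0 xs
      = (okq (fun d => decide (1 ≤ d ∧ d ≤ 3)) prev xs
          || okq (fun d => decide (-3 ≤ d ∧ d ≤ -1)) prev xs)
  | [], _ => rfl
  | x :: xs, prev => by
    by_cases h0 : x - prev = 0 ∨ |x - prev| > 3
    · have hq1 : decide (1 ≤ x - prev ∧ x - prev ≤ 3) = false := by
        simp only [decide_eq_false_iff_not]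
        rcases abs_cases (x - prev) with ⟨he, _⟩ | ⟨he, _⟩ <;> omega
      have hq2 : decide (-3 ≤ x - prev ∧ x - prev ≤ -1) = false := by
        simp only [decide_eq_false_iff_not]
        rcases abs_cases (x - prev) with ⟨he, _⟩ | ⟨he, _⟩ <;> omega
      simp only [safeAux, okq, if_pos h0, hq1, hq2, Bool.false_and, Bool.false_or]
    · by_cases hp : x - prev > 0
      · have hq1 : decide (1 ≤ x - prev ∧ x - prev ≤ 3) = true := by
          simp only [decide_eq_true_eq]
          rcases abs_cases (x - prev) with ⟨he, _⟩ | ⟨he, _⟩ <;> omega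
        have hq2 : decide (-3 ≤ x - prev ∧ x - prev ≤ -1) = false := by
          simp only [decide_eq_false_iff_not]; omega
        simp only [safeAux, okq, if_neg h0, if_pos hp, hq1, hq2, Bool.true_and,
          Bool.false_and, Bool.or_false, safeAux_pos xs x]
        norm_num
      · have hq1 : decide (1 ≤ x - prev ∧ x - prev ≤ 3) = false := by
          simp only [decide_eq_false_iff_not]; omega
        have hq2 : decide (-3 ≤ x - prev ∧ x - prev ≤ -1) = true := by
          simp only [decide_eq_true_eq]
          rcases abs_cases (x - prev) with ⟨he, _⟩ | ⟨he, _⟩ <;> omega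
        simp only [safeAux, okq, if_neg h0, if_neg hp, hq1, hq2, Bool.true_and,
          Bool.false_and, Bool.false_or, safeAux_neg xs x]
        norm_num

-- a threaded pass over a pointwise conjunction splits into two passes
lemma okq_and (p q : Int → Bool) : ∀ (x : Int) (xs : List Int),
    okq (fun d => p d && q d) x xs = (okq p x xs && okq q x xs)
  | _, [] => rfl
  | x, y :: ys => by
    simp only [okq, okq_and p q y ys]
    cases p (y - x) <;> cases q (y - x) <;>
      cases okq p y ys <;> cases okq q y ys <;> rfl

lemma okq_congr (p q : Int → Bool) (h : ∀ d, p d = q d) : ∀ (x : Int) (xs : List Int),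
    okq p x xs = okq q x xs
  | _, [] => rfl
  | x, y :: ys => by simp only [okq, h, okq_congr p q h y ys]

-- positive delta with abs in [1,3] is exactly delta in [1,3]
lemma pw_pos (d : Int) :
    (decide (0 < d) && decide (1 ≤ |d| ∧ |d| ≤ 3)) = decide (1 ≤ d ∧ d ≤ 3) := by
  rw [Bool.eq_iff_iff]
  simp only [Bool.and_eq_true, decide_eq_true_eq]
  rcases abs_cases d with ⟨he, _⟩ | ⟨he, _⟩ <;> rw [he] <;> omega

-- negative delta with abs in [1,3] is exactly delta in [-3,-1]
lemma pw_neg (d : Int) :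
    (decide (d < 0) && decide (1 ≤ |d| ∧ |d| ≤ 3)) = decide (-3 ≤ d ∧ d ≤ -1) := by
  rw [Bool.eq_iff_iff]
  simp only [Bool.and_eq_true, decide_eq_true_eq]
  rcases abs_cases d with ⟨he, _⟩ | ⟨he, _⟩ <;> rw [he] <;> omega

lemma bor_and (a b c : Bool) : ((a || b) && c) = (a && c || b && c) := by
  cases a <;> cases b <;> cases c <;> rfl

-- per-report: A's three-pass test equals B's single early-exit scan
lemma report_eq (r : List Int) :
    ((((PySem.List.pyRange 0 ((r.length : Int) - 1) 1).all
          (fun i => decide (PySem.List.pyGetD r i 0 < PySem.List.pyGetD r (i + 1) 0))) ||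
        ((PySem.List.pyRange 0 ((r.length : Int) - 1) 1).all
          (fun i => decide (PySem.List.pyGetD r i 0 > PySem.List.pyGetD r (i + 1) 0)))) &&
      (((PySem.List.pyRange 0 ((r.length : Int) - 1) 1).map
          (fun i => |PySem.List.pyGetD r (i + 1) 0 - PySem.List.pyGetD r i 0|)).all
        (fun d => decide (1 ≤ d ∧ d ≤ 3))))
    = safe r := by
  rw [List.all_map]
  simp only [Function.comp_def]
  rw [show (fun i => decide (PySem.List.pyGetD r i 0 < PySem.List.pyGetD r (i + 1) 0))
        = (fun i => (fun a b : Int => decide (0 < b - a)) (PySem.List.pyGetD r i 0)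
            (PySem.List.pyGetD r (i + 1) 0)) by
      funext i; rw [decide_eq_decide]; omega,
    show (fun i => decide (PySem.List.pyGetD r i 0 > PySem.List.pyGetD r (i + 1) 0))
        = (fun i => (fun a b : Int => decide (b - a < 0)) (PySem.List.pyGetD r i 0)
            (PySem.List.pyGetD r (i + 1) 0)) by
      funext i; rw [decide_eq_decide]; constructor <;> intro <;> omega,
    show (fun i => decide (1 ≤ |PySem.List.pyGetD r (i + 1) 0 - PySem.List.pyGetD r i 0| ∧
            |PySem.List.pyGetD r (i + 1) 0 - PySem.List.pyGetD r i 0| ≤ 3))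
        = (fun i => (fun a b : Int => decide (1 ≤ |b - a| ∧ |b - a| ≤ 3)) (PySem.List.pyGetD r i 0)
            (PySem.List.pyGetD r (i + 1) 0)) from rfl]
  rw [py_all_zip (fun a b : Int => decide (0 < b - a)) r,
    py_all_zip (fun a b : Int => decide (b - a < 0)) r,
    py_all_zip (fun a b : Int => decide (1 ≤ |b - a| ∧ |b - a| ≤ 3)) r]
  cases r with
  | nil => simp [safe]
  | cons x xs =>
    simp only [List.drop_succ_cons, List.drop_zero]
    rw [zip_eq_okq (fun d => decide (0 < d)) x xs,
      zip_eq_okq (fun d => decide (d < 0)) x xs,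
      zip_eq_okq (fun d => decide (1 ≤ |d| ∧ |d| ≤ 3)) x xs]
    rw [bor_and, ← okq_and, ← okq_and,
      okq_congr _ _ (fun d => pw_pos d) x xs,
      okq_congr _ _ (fun d => pw_neg d) x xs]
    rw [show safe (x :: xs) = safeAux x 0 xs from rfl, safeAux_zero xs x]

-- ===== VERDICT (by name: the statement is the Claim_ definition above) =====
theorem monotonic_window_spec : Claim_equal_monotonic_window := by
  intro data _
  show monotonic_window data = monotonic_window_alt data
  unfold monotonic_window monotonic_window_alt
  congr 1
  funext valid_count report
  simp only [report_eq report]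
  cases h : safe report <;> simp [h]
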